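-- pv_equiv track=rewrite | github.com/xpessoles/Informatique_MPSI | 2020_2021/DS02/corrige_d02S.py | denivmax
-- ===== SOURCE A (Python) =====
-- def denivmax(alt):
--     x, m ,t= 0, 0,0
--     for i,y in enumerate(alt):
--         if y - x > m:
--             m = y - x
--             t=i+1
--         x = y
--     return m,t
-- ===== SOURCE B (Python) =====
-- def denivmax(alt):
--     # Two-pass rewrite: build the difference table, then max/index lookups.
--     diffs = []
--     prev = 0
--     for y in alt:
--         diffs.append(y - prev)
--         prev = y
--     m = max(diffs, default=0)
--     if m <= 0:
--         return (0, 0)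
--     return (m, diffs.index(m) + 1)
-- ===== Notes on version B (the rewrite author's own statement) =====
-- stated objective: alternative
-- what changed: A's single fused scan carrying running (prev, max, index) state is replaced by two passes: first build the consecutive-difference table, then take max(diffs, default=0) and diffs.index(m) for the first index.
import Mathlib
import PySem

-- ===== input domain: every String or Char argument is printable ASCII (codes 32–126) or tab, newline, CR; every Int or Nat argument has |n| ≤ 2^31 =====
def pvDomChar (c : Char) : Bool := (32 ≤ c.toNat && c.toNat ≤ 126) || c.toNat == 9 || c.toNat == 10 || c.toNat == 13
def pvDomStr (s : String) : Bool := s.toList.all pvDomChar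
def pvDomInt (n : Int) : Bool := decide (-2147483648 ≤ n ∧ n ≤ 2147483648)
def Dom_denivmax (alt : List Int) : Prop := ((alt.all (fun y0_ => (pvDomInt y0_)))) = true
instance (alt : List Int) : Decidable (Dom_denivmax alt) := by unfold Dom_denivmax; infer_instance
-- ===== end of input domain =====

-- B replaces A's fused running-max scan by a difference table plus max/index lookups (alternative decomposition, same cost).

-- ===== PORT A =====
-- the for-loop over enumerate(alt) with state (x, m, t); i is the current enumerate index
def denivmaxGo (l : List Int) (x m t : Int) (i : Int) : Int × Int :=
  match l with
  | [] => (m, t)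
  | y :: ys =>
    if y - x > m then denivmaxGo ys y (y - x) (i + 1) (i + 1)
    else denivmaxGo ys y m t (i + 1)

def denivmax (alt : List Int) : Int × Int := denivmaxGo alt 0 0 0 0

-- ===== PORT B =====
-- first pass of Source B: the appended difference list, carrying prev
def diffsB (prev : Int) (l : List Int) : List Int :=
  match l with
  | [] => []
  | y :: ys => (y - prev) :: diffsB y ys

def denivmax_alt (alt : List Int) : Int × Int :=
  let diffs := diffsB 0 alt
  let m := (PySem.List.max? diffs (fun d => d)).getD 0   -- max(diffs, default=0)
  if m ≤ 0 then (0, 0)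
  else
    match PySem.List.index? diffs m with
    | some i => (m, (i : Int) + 1)
    | none => (0, 0)   -- unreachable: m > 0 comes from max?, hence m ∈ diffs

-- ===== PRECONDITION & SPEC =====
def Spec_denivmax (alt : List Int) (out : Int × Int) : Prop := out = denivmax_alt alt
instance (alt : List Int) (out : Int × Int) : Decidable (Spec_denivmax alt out) := by unfold Spec_denivmax; infer_instance

-- ===== CLAIM (what is proved, stated in full; the proofs are below) =====
def Claim_equal_denivmax : Prop := ∀ (alt : List Int), Dom_denivmax alt → Spec_denivmax alt (denivmax alt)

-- ===== LEMMAS AND PROOFS =====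

-- A's loop, re-expressed over the difference list
def go2 (ds : List Int) (m t i : Int) : Int × Int :=
  match ds with
  | [] => (m, t)
  | d :: ds' =>
    if d > m then go2 ds' d (i + 1) (i + 1)
    else go2 ds' m t (i + 1)

theorem denivmaxGo_eq_go2 (l : List Int) (x m t i : Int) :
    denivmaxGo l x m t i = go2 (diffsB x l) m t i := by
  induction l generalizing x m t i with
  | nil => rfl
  | cons y ys ih =>
    simp only [denivmaxGo, diffsB, go2]
    split_ifs with h
    · exact ih y (y - x) (i + 1) (i + 1)
    · exact ih y m t (i + 1)

theorem foldl_max_pull (l : List Int) (x y : Int) :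
    l.foldl max (max x y) = max x (l.foldl max y) := by
  induction l generalizing y with
  | nil => rfl
  | cons b l ih =>
    simp only [List.foldl]
    rw [max_assoc, ih]

theorem foldl_max_of_all_le (l : List Int) (a : Int) (h : ∀ e ∈ l, e ≤ a) :
    l.foldl max a = a := by
  induction l with
  | nil => rfl
  | cons b l ih =>
    simp only [List.foldl]
    rw [max_eq_left (h b (by simp))]
    exact ih (fun e he => h e (by simp [he]))

theorem lt_foldl_max_of_exists (l : List Int) (a : Int)
    (h : ∃ e ∈ l, a < e) : a < l.foldl max a := by
  obtain ⟨e, he, hgt⟩ := h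
  exact lt_of_lt_of_le hgt ((PySem.List.le_foldl_max l a).2 e he)

theorem foldl_max_mem_of_lt (l : List Int) (a : Int) (h : a < l.foldl max a) :
    l.foldl max a ∈ l := by
  rcases PySem.List.foldl_max_mem l a with h' | h'
  · rw [h'] at h; exact absurd h (lt_irrefl a)
  · exact h'

-- characterisation of A's loop: either nothing beats m, or the result is the running max with its first index
theorem go2_spec (ds : List Int) (m t i : Int) :
    go2 ds m t i =
      if ∀ d ∈ ds, d ≤ m then (m, t)
      else (ds.foldl max m, i + ((PySem.List.index? ds (ds.foldl max m)).getD 0 : Int) + 1) := by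
  induction ds generalizing m t i with
  | nil => simp [go2]
  | cons d ds' ih =>
    have hnotall : d > m → ¬ ∀ e ∈ d :: ds', e ≤ m := fun hd h =>
      absurd (h d (by simp)) (not_le.mpr hd)
    simp only [go2]
    by_cases hd : d > m
    · rw [if_pos hd, ih d (i + 1) (i + 1)]
      have hfold : (d :: ds').foldl max m = ds'.foldl max d := by
        simp only [List.foldl]
        rw [max_eq_right (le_of_lt hd)]
      by_cases hall : ∀ e ∈ ds', e ≤ d
      · rw [if_pos hall, if_neg (hnotall hd), hfold,
          foldl_max_of_all_le ds' d hall, PySem.List.index?_cons_self]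
        simp
      · have hMgt : d < ds'.foldl max d :=
          lt_foldl_max_of_exists ds' d (by push_neg at hall; exact hall)
        rw [if_neg hall, if_neg (hnotall hd), hfold,
          PySem.List.index?_cons_of_ne ds' (ne_of_lt hMgt)]
        rcases hidx : PySem.List.index? ds' (ds'.foldl max d) with _ | k
        · exact absurd (foldl_max_mem_of_lt ds' d hMgt)
            ((PySem.List.index?_eq_none_iff ds' _).mp hidx)
        · simp only [Option.map_some, Option.getD_some]
          push_cast; ring_nf
    · rw [if_neg hd]
      push_neg at hd
      rw [ih m t (i + 1)]
      have hfold : (d :: ds').foldl max m = ds'.foldl max m := by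
        simp only [List.foldl]
        rw [max_eq_left hd]
      by_cases hall : ∀ e ∈ ds', e ≤ m
      · have hall' : ∀ e ∈ d :: ds', e ≤ m := by
          intro e he; rcases List.mem_cons.mp he with rfl | h
          · exact hd
          · exact hall e h
        rw [if_pos hall, if_pos hall']
      · have hnot : ¬ ∀ e ∈ d :: ds', e ≤ m := fun h =>
          hall (fun e he => h e (by simp [he]))
        have hMgt : m < ds'.foldl max m :=
          lt_foldl_max_of_exists ds' m (by push_neg at hall; exact hall)
        rw [if_neg hall, if_neg hnot, hfold,
          PySem.List.index?_cons_of_ne ds' (ne_of_lt (lt_of_le_of_lt hd hMgt))]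
        rcases hidx : PySem.List.index? ds' (ds'.foldl max m) with _ | k
        · exact absurd (foldl_max_mem_of_lt ds' m hMgt)
            ((PySem.List.index?_eq_none_iff ds' _).mp hidx)
        · simp only [Option.map_some, Option.getD_some]
          push_cast; ring_nf

-- ===== VERDICT (by name: the statement is the Claim_ definition above) =====
theorem denivmax_spec : Claim_equal_denivmax := by
  intro alt _
  unfold Spec_denivmax denivmax denivmax_alt
  rw [denivmaxGo_eq_go2, go2_spec]
  rcases hd : diffsB 0 alt with _ | ⟨a, t⟩ 
  · simp [PySem.List.max?]
  · simp only [PySem.List.max?_id_cons, Option.getD_some]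
    by_cases hall : ∀ d ∈ a :: t, d ≤ (0 : Int)
    · have hM : t.foldl max a ≤ 0 := by
        rcases PySem.List.foldl_max_mem t a with h | h
        · rw [h]; exact hall a (by simp)
        · exact hall _ (by simp [h])
      rw [if_pos hall, if_pos hM]
    · have hMpos : (0 : Int) < t.foldl max a := by
        push_neg at hall
        obtain ⟨e, he, hgt⟩ := hall
        rcases List.mem_cons.mp he with rfl | h
        · exact lt_of_lt_of_le hgt (PySem.List.le_foldl_max t e).1
        · exact lt_of_lt_of_le hgt ((PySem.List.le_foldl_max t a).2 e h)
      have hfold0 : (a :: t).foldl max 0 = t.foldl max a := by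
        have h1 : (a :: t).foldl max 0 = max 0 (t.foldl max a) := foldl_max_pull t 0 a
        rw [h1]; exact max_eq_right (le_of_lt hMpos)
      rw [if_neg hall, if_neg (not_le.mpr hMpos), hfold0]
      rcases hidx : PySem.List.index? (a :: t) (t.foldl max a) with _ | k
      · exfalso
        apply (PySem.List.index?_eq_none_iff (a :: t) _).mp hidx
        have := foldl_max_mem_of_lt (a :: t) 0 (by rw [hfold0]; exact hMpos)
        rwa [hfold0] at this
      · simp only [Option.getD_some]
        ring_nf
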